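-- pv_equiv track=rewrite | github.com/louisexpc/AI-Agent-Refactoring-System | runner/indexer.py | _detect_indicators
-- ===== SOURCE A (Python) =====
-- def _detect_indicators(file_paths: set[str]) -> list[str]:
--     """偵測 build/test 相關指標檔。
--
--     Args:
--         file_paths: 相對路徑集合。
--
--     Returns:
--         指標字串列表。
--     """
--     indicators: list[str] = []
--     indicator_files = {
--         "pyproject.toml",
--         "requirements.txt",
--         "package.json",
--         "pom.xml",
--         "build.gradle",
--         "composer.json",
--         "pytest.ini",
--     }
--     for name in indicator_files:
--         if name in file_paths:
--             indicators.append(name)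
--
--     template_exts = {".erb", ".jinja", ".jinja2", ".ejs"}
--     has_templates = any(
--         path.endswith(tuple(template_exts))
--         or "/templates/" in path
--         or "/views/" in path
--         for path in file_paths
--     )
--     if has_templates:
--         indicators.append("templates")
--
--     return sorted(set(indicators))
-- ===== SOURCE B (Python) =====
-- def _detect_indicators(file_paths: set[str]) -> list[str]:
--     """Bitmask over a pre-sorted candidate table: one pass over file_paths ORs in a bit
--     for each candidate hit (bit 7 = templates), then the mask is decoded positionally --
--     no result set is built and no sort is performed."""
--     CANDIDATES = (
--         "build.gradle",
--         "composer.json",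
--         "package.json",
--         "pom.xml",
--         "pyproject.toml",
--         "pytest.ini",
--         "requirements.txt",
--     )
--     TEMPLATE_EXTS = (".erb", ".jinja", ".jinja2", ".ejs")
--     mask = 0
--     for path in file_paths:
--         try:
--             mask |= 1 << CANDIDATES.index(path)
--         except ValueError:
--             pass
--         if path.endswith(TEMPLATE_EXTS) or "/templates/" in path or "/views/" in path:
--             mask |= 1 << 7
--     return [name for i, name in enumerate(CANDIDATES + ("templates",)) if mask >> i & 1]
-- ===== Notes on version B (the rewrite author's own statement) =====
-- stated objective: alternative
-- what changed: B encodes hits as a bitmask over a pre-sorted candidate table (bit per candidate, bit 7 = templates) in one pass over file_paths, then decodes the mask positionally -- no result set is built and no final sort is performed, unlike A's list + set-dedup + sorted().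
import Mathlib
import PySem

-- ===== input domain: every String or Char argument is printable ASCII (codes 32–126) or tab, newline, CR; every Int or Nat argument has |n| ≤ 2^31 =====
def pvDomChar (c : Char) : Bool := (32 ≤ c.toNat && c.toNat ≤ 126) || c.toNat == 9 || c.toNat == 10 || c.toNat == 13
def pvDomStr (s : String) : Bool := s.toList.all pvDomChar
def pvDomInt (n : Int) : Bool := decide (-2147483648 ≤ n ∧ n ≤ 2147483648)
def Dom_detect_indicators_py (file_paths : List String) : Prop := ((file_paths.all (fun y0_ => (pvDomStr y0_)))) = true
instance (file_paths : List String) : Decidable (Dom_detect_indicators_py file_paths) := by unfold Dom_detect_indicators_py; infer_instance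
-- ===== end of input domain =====

-- B replaces A's build-list/dedup/sort pipeline by a bitmask over a pre-sorted candidate
-- table, decoded positionally; no result set is built and no sort is performed (objective: alternative).


-- the template test both Pythons share:
-- path.endswith((".erb", ".jinja", ".jinja2", ".ejs")) or "/templates/" in path or "/views/" in path
def pvIsTemplatePath (path : String) : Bool :=
  PySem.Str.endswith path ".erb" || PySem.Str.endswith path ".jinja" ||
  PySem.Str.endswith path ".jinja2" || PySem.Str.endswith path ".ejs" ||
  PySem.Str.isIn "/templates/" path || PySem.Str.isIn "/views/" path

-- ===== PORT A =====
-- A's literal indicator set, in its written order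
def pvIndicatorFiles : List String :=
  ["pyproject.toml", "requirements.txt", "package.json", "pom.xml",
   "build.gradle", "composer.json", "pytest.ini"]

def detect_indicators_py (file_paths : List String) : List String :=
  -- for name in indicator_files: if name in file_paths: indicators.append(name)
  let indicators : List String :=
    pvIndicatorFiles.foldl
      (fun acc name => if file_paths.contains name then acc ++ [name] else acc) []
  -- has_templates = any(... for path in file_paths)
  let has_templates : Bool := file_paths.any pvIsTemplatePath
  let indicators := if has_templates then indicators ++ ["templates"] else indicators
  -- return sorted(set(indicators))
  PySem.List.sorted (PySem.Set.ofList indicators) (fun x => x) false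

-- ===== PORT B =====
-- B's CANDIDATES tuple (already alphabetically sorted)
def pvSortedCandidates : List String :=
  ["build.gradle", "composer.json", "package.json", "pom.xml",
   "pyproject.toml", "pytest.ini", "requirements.txt"]

def detect_indicators_py_alt (file_paths : List String) : List String :=
  -- mask is a Python int that only ever has bits 0..7 OR-ed in, so it is a Nat exactly;
  -- CANDIDATES.index(path) inside try/except ValueError = PySem.List.index? with the none branch a no-op
  let mask : Nat :=
    file_paths.foldl
      (fun m path =>
        let m := match PySem.List.index? pvSortedCandidates path with
          | some i => m ||| (1 <<< i)
          | none => m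
        if pvIsTemplatePath path then m ||| (1 <<< 7) else m)
      0
  -- [name for i, name in enumerate(CANDIDATES + ("templates",)) if mask >> i & 1];
  -- enumerate indices are 0..7, so .toNat is exact; 'mask >> i & 1' is truthy iff it equals 1
  ((PySem.List.enumerate (pvSortedCandidates ++ ["templates"]) 0).filter
      (fun p => (mask >>> p.1.toNat) &&& 1 == 1)).map (fun p => p.2)

-- ===== PRECONDITION & SPEC =====
def Spec_detect_indicators_py (file_paths : List String) (out : List String) : Prop := out = detect_indicators_py_alt file_paths
instance (file_paths : List String) (out : List String) : Decidable (Spec_detect_indicators_py file_paths out) := by unfold Spec_detect_indicators_py; infer_instance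

-- ===== CLAIM (what is proved, stated in full; the proofs are below) =====
def Claim_equal_detect_indicators_py : Prop := ∀ (file_paths : List String), Dom_detect_indicators_py file_paths → Spec_detect_indicators_py file_paths (detect_indicators_py file_paths)

-- ===== LEMMAS AND PROOFS =====

-- an optional singleton, and the canonical (sorted) answer both ports are reduced to
def pvOpt (b : Bool) (s : String) : List String := if b then [s] else []

def pvCanonical (fp : List String) : List String :=
  pvOpt (fp.contains "build.gradle") "build.gradle" ++
  pvOpt (fp.contains "composer.json") "composer.json" ++
  pvOpt (fp.contains "package.json") "package.json" ++
  pvOpt (fp.contains "pom.xml") "pom.xml" ++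
  pvOpt (fp.contains "pyproject.toml") "pyproject.toml" ++
  pvOpt (fp.contains "pytest.ini") "pytest.ini" ++
  pvOpt (fp.contains "requirements.txt") "requirements.txt" ++
  pvOpt (fp.any pvIsTemplatePath) "templates"

-- an 8-bit mask from its bits (bit i set iff b_i)
def pvBits (b0 b1 b2 b3 b4 b5 b6 b7 : Bool) : Nat :=
  (if b0 then 1 else 0) ||| (if b1 then 2 else 0) ||| (if b2 then 4 else 0) |||
  (if b3 then 8 else 0) ||| (if b4 then 16 else 0) ||| (if b5 then 32 else 0) |||
  (if b6 then 64 else 0) ||| (if b7 then 128 else 0)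

def pvMaskTarget (fp : List String) : Nat :=
  pvBits (fp.contains "build.gradle") (fp.contains "composer.json")
    (fp.contains "package.json") (fp.contains "pom.xml")
    (fp.contains "pyproject.toml") (fp.contains "pytest.ini")
    (fp.contains "requirements.txt") (fp.any pvIsTemplatePath)

theorem pvBits_or (a0 a1 a2 a3 a4 a5 a6 a7 b0 b1 b2 b3 b4 b5 b6 b7 : Bool) :
    pvBits a0 a1 a2 a3 a4 a5 a6 a7 ||| pvBits b0 b1 b2 b3 b4 b5 b6 b7
      = pvBits (a0 || b0) (a1 || b1) (a2 || b2) (a3 || b3)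
          (a4 || b4) (a5 || b5) (a6 || b6) (a7 || b7) := by
  revert a0 a1 a2 a3 a4 a5 a6 a7 b0 b1 b2 b3 b4 b5 b6 b7; decide

theorem pvBits_or_128 (m : Nat) (b0 b1 b2 b3 b4 b5 b6 : Bool) :
    (m ||| pvBits b0 b1 b2 b3 b4 b5 b6 false) ||| 1 <<< 7
      = m ||| pvBits b0 b1 b2 b3 b4 b5 b6 true := by
  rw [Nat.or_assoc]
  have h : pvBits b0 b1 b2 b3 b4 b5 b6 false ||| 1 <<< 7
      = pvBits b0 b1 b2 b3 b4 b5 b6 true := by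
    revert b0 b1 b2 b3 b4 b5 b6; decide
  rw [h]

-- the index?-match of one loop step of B ORs in exactly the candidate bit of the path
theorem pvMatch_eq (m : Nat) (p : String) :
    (match PySem.List.index? pvSortedCandidates p with
      | some i => m ||| (1 <<< i)
      | none => m)
    = m ||| pvBits ("build.gradle" == p) ("composer.json" == p) ("package.json" == p)
        ("pom.xml" == p) ("pyproject.toml" == p) ("pytest.ini" == p)
        ("requirements.txt" == p) false := by
  rcases h : PySem.List.index? pvSortedCandidates p with _ | i
  · have hmem : p ∉ pvSortedCandidates := (PySem.List.index?_eq_none_iff _ _).mp h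
    simp only [pvSortedCandidates, List.mem_cons, List.not_mem_nil, or_false, not_or] at hmem
    obtain ⟨h0, h1, h2, h3, h4, h5, h6⟩ := hmem
    simp [pvBits, beq_iff_eq, Ne.symm h0, Ne.symm h1, Ne.symm h2, Ne.symm h3, Ne.symm h4,
      Ne.symm h5, Ne.symm h6]
  · obtain ⟨hk, hget, -⟩ := PySem.List.getElem_of_index?_eq_some h
    have hk7 : i < 7 := by simpa [pvSortedCandidates] using hk
    interval_cases i <;>
      · simp only [pvSortedCandidates, List.getElem_cons_zero, List.getElem_cons_succ] at hget
        subst hget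
        congr 1

theorem pvFold_mask (fp : List String) (m : Nat) :
    fp.foldl
      (fun m path =>
        let m := match PySem.List.index? pvSortedCandidates path with
          | some i => m ||| (1 <<< i)
          | none => m
        if pvIsTemplatePath path then m ||| (1 <<< 7) else m) m
    = m ||| pvMaskTarget fp := by
  induction fp generalizing m with
  | nil => simp [pvMaskTarget, pvBits]
  | cons p t ih =>
    rw [List.foldl_cons, ih]
    have hstep :
        (let m' := match PySem.List.index? pvSortedCandidates p with
            | some i => m ||| (1 <<< i)
            | none => m
         if pvIsTemplatePath p then m' ||| (1 <<< 7) else m')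
        = m ||| pvBits ("build.gradle" == p) ("composer.json" == p) ("package.json" == p)
            ("pom.xml" == p) ("pyproject.toml" == p) ("pytest.ini" == p)
            ("requirements.txt" == p) (pvIsTemplatePath p) := by
      cases hT : pvIsTemplatePath p <;>
        simp only [Bool.false_eq_true, if_false, if_true]
      · exact pvMatch_eq m p
      · rw [pvMatch_eq m p]; exact pvBits_or_128 m _ _ _ _ _ _ _
    simp only [hstep, Nat.or_assoc, pvMaskTarget, List.contains_cons, List.any_cons, pvBits_or]

-- decoding an 8-bit mask positionally over the sorted table is the canonical chain
theorem pvDecode (b0 b1 b2 b3 b4 b5 b6 b7 : Bool) :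
    ((PySem.List.enumerate (pvSortedCandidates ++ ["templates"]) 0).filter
        (fun p => (pvBits b0 b1 b2 b3 b4 b5 b6 b7 >>> p.1.toNat) &&& 1 == 1)).map (fun p => p.2)
    = pvOpt b0 "build.gradle" ++ pvOpt b1 "composer.json" ++ pvOpt b2 "package.json" ++
      pvOpt b3 "pom.xml" ++ pvOpt b4 "pyproject.toml" ++ pvOpt b5 "pytest.ini" ++
      pvOpt b6 "requirements.txt" ++ pvOpt b7 "templates" := by
  revert b0 b1 b2 b3 b4 b5 b6 b7; decide

theorem alt_eq_canonical (fp : List String) :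
    detect_indicators_py_alt fp = pvCanonical fp := by
  simp only [detect_indicators_py_alt]
  rw [pvFold_mask fp 0, Nat.zero_or]
  simpa only [pvMaskTarget] using pvDecode (fp.contains "build.gradle") (fp.contains "composer.json")
    (fp.contains "package.json") (fp.contains "pom.xml") (fp.contains "pyproject.toml")
    (fp.contains "pytest.ini") (fp.contains "requirements.txt") (fp.any pvIsTemplatePath)

-- A's indicator loop as an append chain of optional singletons
theorem pvAList (fp : List String) :
    pvIndicatorFiles.foldl
      (fun acc name => if fp.contains name then acc ++ [name] else acc) []
    = pvOpt (fp.contains "pyproject.toml") "pyproject.toml" ++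
      pvOpt (fp.contains "requirements.txt") "requirements.txt" ++
      pvOpt (fp.contains "package.json") "package.json" ++
      pvOpt (fp.contains "pom.xml") "pom.xml" ++
      pvOpt (fp.contains "build.gradle") "build.gradle" ++
      pvOpt (fp.contains "composer.json") "composer.json" ++
      pvOpt (fp.contains "pytest.ini") "pytest.ini" := by
  simp only [pvIndicatorFiles, List.foldl_cons, List.foldl_nil, pvOpt]
  split_ifs <;> simp

theorem pvANodup (b0 b1 b2 b3 b4 b5 b6 b7 : Bool) :
    (pvOpt b0 "pyproject.toml" ++ pvOpt b1 "requirements.txt" ++ pvOpt b2 "package.json" ++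
     pvOpt b3 "pom.xml" ++ pvOpt b4 "build.gradle" ++ pvOpt b5 "composer.json" ++
     pvOpt b6 "pytest.ini" ++ pvOpt b7 "templates").Nodup := by
  revert b0 b1 b2 b3 b4 b5 b6 b7; decide

theorem pvAPerm (b0 b1 b2 b3 b4 b5 b6 b7 : Bool) :
    (pvOpt b4 "build.gradle" ++ pvOpt b5 "composer.json" ++ pvOpt b2 "package.json" ++
     pvOpt b3 "pom.xml" ++ pvOpt b0 "pyproject.toml" ++ pvOpt b6 "pytest.ini" ++
     pvOpt b1 "requirements.txt" ++ pvOpt b7 "templates").Perm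
    (pvOpt b0 "pyproject.toml" ++ pvOpt b1 "requirements.txt" ++ pvOpt b2 "package.json" ++
     pvOpt b3 "pom.xml" ++ pvOpt b4 "build.gradle" ++ pvOpt b5 "composer.json" ++
     pvOpt b6 "pytest.ini" ++ pvOpt b7 "templates") := by
  revert b0 b1 b2 b3 b4 b5 b6 b7; decide

theorem pvCPairwise (b0 b1 b2 b3 b4 b5 b6 b7 : Bool) :
    (pvOpt b0 "build.gradle" ++ pvOpt b1 "composer.json" ++ pvOpt b2 "package.json" ++
     pvOpt b3 "pom.xml" ++ pvOpt b4 "pyproject.toml" ++ pvOpt b5 "pytest.ini" ++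
     pvOpt b6 "requirements.txt" ++ pvOpt b7 "templates").Pairwise (fun a b => a ≤ b) := by
  have h : (pvOpt b0 "build.gradle" ++ pvOpt b1 "composer.json" ++ pvOpt b2 "package.json" ++
      pvOpt b3 "pom.xml" ++ pvOpt b4 "pyproject.toml" ++ pvOpt b5 "pytest.ini" ++
      pvOpt b6 "requirements.txt" ++ pvOpt b7 "templates").Pairwise
        (fun a b : String => a.toList ≤ b.toList) := by
    revert b0 b1 b2 b3 b4 b5 b6 b7; decide
  exact h.imp (fun hab => String.le_iff_toList_le.mpr hab)

theorem a_eq_canonical (fp : List String) :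
    detect_indicators_py fp = pvCanonical fp := by
  simp only [detect_indicators_py]
  rw [pvAList fp]
  have hshape :
      (if fp.any pvIsTemplatePath then
        (pvOpt (fp.contains "pyproject.toml") "pyproject.toml" ++
         pvOpt (fp.contains "requirements.txt") "requirements.txt" ++
         pvOpt (fp.contains "package.json") "package.json" ++
         pvOpt (fp.contains "pom.xml") "pom.xml" ++
         pvOpt (fp.contains "build.gradle") "build.gradle" ++
         pvOpt (fp.contains "composer.json") "composer.json" ++
         pvOpt (fp.contains "pytest.ini") "pytest.ini") ++ ["templates"]
       else
        pvOpt (fp.contains "pyproject.toml") "pyproject.toml" ++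
        pvOpt (fp.contains "requirements.txt") "requirements.txt" ++
        pvOpt (fp.contains "package.json") "package.json" ++
        pvOpt (fp.contains "pom.xml") "pom.xml" ++
        pvOpt (fp.contains "build.gradle") "build.gradle" ++
        pvOpt (fp.contains "composer.json") "composer.json" ++
        pvOpt (fp.contains "pytest.ini") "pytest.ini")
      = pvOpt (fp.contains "pyproject.toml") "pyproject.toml" ++
        pvOpt (fp.contains "requirements.txt") "requirements.txt" ++
        pvOpt (fp.contains "package.json") "package.json" ++
        pvOpt (fp.contains "pom.xml") "pom.xml" ++
        pvOpt (fp.contains "build.gradle") "build.gradle" ++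
        pvOpt (fp.contains "composer.json") "composer.json" ++
        pvOpt (fp.contains "pytest.ini") "pytest.ini" ++
        pvOpt (fp.any pvIsTemplatePath) "templates" := by
    cases h : fp.any pvIsTemplatePath <;> simp [pvOpt, List.append_assoc]
  rw [hshape,
    PySem.Set.ofList_eq_self_of_nodup _
      (pvANodup (fp.contains "pyproject.toml") (fp.contains "requirements.txt")
        (fp.contains "package.json") (fp.contains "pom.xml") (fp.contains "build.gradle")
        (fp.contains "composer.json") (fp.contains "pytest.ini") (fp.any pvIsTemplatePath))]
  unfold pvCanonical
  exact PySem.List.sorted_id_eq_of_perm_of_pairwise _ _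
    (pvAPerm (fp.contains "pyproject.toml") (fp.contains "requirements.txt")
      (fp.contains "package.json") (fp.contains "pom.xml") (fp.contains "build.gradle")
      (fp.contains "composer.json") (fp.contains "pytest.ini") (fp.any pvIsTemplatePath))
    (pvCPairwise (fp.contains "build.gradle") (fp.contains "composer.json")
      (fp.contains "package.json") (fp.contains "pom.xml") (fp.contains "pyproject.toml")
      (fp.contains "pytest.ini") (fp.contains "requirements.txt") (fp.any pvIsTemplatePath))

-- ===== VERDICT (by name: the statement is the Claim_ definition above) =====
theorem detect_indicators_py_spec : Claim_equal_detect_indicators_py := by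
  intro fp _
  unfold Spec_detect_indicators_py
  rw [a_eq_canonical, alt_eq_canonical]
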